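-- pv_equiv track=rewrite | github.com/kevin-v96/codesignal-arcade | Intro/12 - sortByHeight.py | solution
-- ===== SOURCE A (Python) =====
-- def solution(a):
--     a_sorted = sorted([i for i in a if i != -1])
--
--     j = 0
--
--     for i in range(len(a)):
--         if a[i] != -1:
--             a[i] = a_sorted[j]
--             j += 1
--
--     return a
-- ===== SOURCE B (Python) =====
-- def solution(a):
--     # Selection-style: repeatedly extract the minimum of the remaining value
--     # pool for each non-(-1) slot. Unlike A, builds and returns a new list
--     # (A mutates `a` in place); equivalence is about the return value.
--     vals = [x for x in a if x != -1]
--     out = []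
--     for x in a:
--         if x == -1:
--             out.append(-1)
--         else:
--             m = min(vals)
--             vals.remove(m)
--             out.append(m)
--     return out
-- ===== Notes on version B (the rewrite author's own statement) =====
-- stated objective: alternative
-- what changed: A sorts the non-(-1) values once and writes them back into a in a scan with a running counter; B never sorts: it keeps a pool of the non-(-1) values and, for each non-(-1) slot, extracts the minimum of the pool (min + remove) and appends it to a freshly built output list. A mutates a in place, B returns a new list, so the equivalence is about the return value.
import Mathlib
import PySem

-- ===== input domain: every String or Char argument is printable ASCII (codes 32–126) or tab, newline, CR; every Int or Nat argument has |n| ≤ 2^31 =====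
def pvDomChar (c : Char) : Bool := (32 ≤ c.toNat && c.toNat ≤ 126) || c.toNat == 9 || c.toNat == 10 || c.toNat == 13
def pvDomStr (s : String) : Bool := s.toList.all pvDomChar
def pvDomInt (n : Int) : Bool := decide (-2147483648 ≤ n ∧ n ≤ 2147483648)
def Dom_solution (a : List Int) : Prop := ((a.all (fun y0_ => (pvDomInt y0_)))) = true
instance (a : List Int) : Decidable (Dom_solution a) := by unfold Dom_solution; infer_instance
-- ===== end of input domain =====

-- B never sorts: for each non-(-1) slot it extracts the minimum of the remaining value pool
-- (repeated min + remove) into a freshly built output list; A mutates `a` in place while B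
-- returns a new list, so the equivalence proved here is about the RETURN value.

-- ===== PORT A =====
def solution (a : List Int) : List Int :=
  let aSorted := PySem.List.sorted (a.filter (fun i => i ≠ -1)) (fun x => x) false
  let st := (PySem.List.pyRange 0 a.length 1).foldl
    (fun (st : List Int × Int) i =>
      if PySem.List.pyGetD st.1 i 0 ≠ -1 then
        (PySem.List.pySetD st.1 i (PySem.List.pyGetD aSorted st.2 0), st.2 + 1)
      else st)
    (a, 0)
  st.1

-- ===== PORT B =====
def solution_alt (a : List Int) : List Int :=
  let vals := a.filter (fun x => x ≠ -1)
  let st := a.foldl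
    (fun (st : List Int × List Int) x =>
      if x = -1 then (st.1, st.2 ++ [-1])
      else
        -- min(vals) / vals.remove(m): Python would raise on an empty pool, which is
        -- unreachable here (the pool holds exactly the not-yet-placed non-(-1) values);
        -- the `none` fallbacks are the ports of those unreachable raises.
        match PySem.List.min? st.1 (fun y => y) with
        | some m => ((PySem.List.remove? st.1 m).getD st.1, st.2 ++ [m])
        | none => (st.1, st.2 ++ [0]))
    (vals, [])
  st.2

-- ===== PRECONDITION & SPEC =====
def Spec_solution (a : List Int) (out : List Int) : Prop := out = solution_alt a
instance (a : List Int) (out : List Int) : Decidable (Spec_solution a out) := by unfold Spec_solution; infer_instance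

-- ===== CLAIM (what is proved, stated in full; the proofs are below) =====
def Claim_equal_solution : Prop := ∀ (a : List Int), Dom_solution a → Spec_solution a (solution a)

-- ===== LEMMAS AND PROOFS =====

-- Functional middle ground both ports are reduced to: place the list vs of values, in order,
-- at the non-(-1) positions of the template list.
def pvPlace : List Int → List Int → List Int
  | [], _ => []
  | x :: xs, vs => if x = -1 then -1 :: pvPlace xs vs
      else vs.headD 0 :: pvPlace xs vs.tail

-- A's counter loop from position m with counter j, acting on cur (which agrees with a from m on),
-- returns cur's prefix followed by placing the remaining sorted values into a's suffix.
theorem pv_A_loop (a vals : List Int) :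
    ∀ (m : Nat) (cur : List Int) (j : Nat),
      cur.length = a.length →
      (∀ k : Nat, m ≤ k → cur[k]? = a[k]?) →
      ((PySem.List.pyRange (m : Int) (a.length : Int) 1).foldl
        (fun (st : List Int × Int) i =>
          if PySem.List.pyGetD st.1 i 0 ≠ -1 then
            (PySem.List.pySetD st.1 i (PySem.List.pyGetD vals st.2 0), st.2 + 1)
          else st)
        (cur, (j : Int))).1
      = cur.take m ++ pvPlace (a.drop m) (vals.drop j) := by
  intro m cur j hlen hsame
  by_cases h : m < a.length
  · rw [PySem.List.pyRange_one_cons (by exact_mod_cast h)]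
    have hm' : m < cur.length := hlen ▸ h
    have hcc : PySem.List.pyGetD cur ((m : Nat) : Int) 0 = a[m] := by
      rw [PySem.List.pyGetD_ofNat cur m 0 hm']
      have := hsame m le_rfl
      rw [List.getElem?_eq_getElem hm', List.getElem?_eq_getElem h] at this
      exact Option.some_injective _ this
    have hdrop : a.drop m = a[m] :: a.drop (m + 1) := List.drop_eq_getElem_cons h
    have htake : cur.take (m + 1) = cur.take m ++ [a[m]] := by
      rw [List.take_add_one, List.getElem?_eq_getElem hm']
      have := hsame m le_rfl
      rw [List.getElem?_eq_getElem hm', List.getElem?_eq_getElem h] at this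
      simp [Option.some_injective _ this]
    rw [List.foldl_cons, hcc, hdrop]
    by_cases hv : a[m] = -1
    · have hrec := pv_A_loop a vals (m + 1) cur j hlen (fun k hk => hsame k (by omega))
      push_cast at hrec
      rw [if_neg (not_not_intro hv), hrec, htake, hv]
      simp [pvPlace]
    · have hgv : PySem.List.pyGetD vals ((j : Nat) : Int) 0 = (vals.drop j).headD 0 := by
        by_cases hj : j < vals.length
        · rw [PySem.List.pyGetD_ofNat vals j 0 hj, List.drop_eq_getElem_cons hj]
          rfl
        · rw [List.drop_eq_nil_of_le (Nat.le_of_not_lt hj)]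
          simp [PySem.List.pyGetD, PySem.List.pyIdx?, PySem.List.pyGet?, hj]
      set v := (vals.drop j).headD 0 with hvv
      have hrec := pv_A_loop a vals (m + 1) (cur.set m v) (j + 1)
        (by simpa using hlen)
        (fun k hk => by
          rw [List.getElem?_set_ne (by omega)]
          exact hsame k (by omega))
      push_cast at hrec
      have htake' : (cur.set m v).take (m + 1) = cur.take m ++ [v] := by
        rw [List.take_add_one, List.getElem?_set_self hm', List.take_set,
          List.set_eq_of_length_le (by simp)]
        rfl
      rw [if_pos hv, hgv, PySem.List.pySetD_natCast, hrec, htake']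
      simp [pvPlace, hv, hvv, List.headD_eq_head?_getD, List.head?_drop]
  · rw [PySem.List.pyRange_one_eq_nil (by exact_mod_cast Nat.le_of_not_lt h)]
    rw [List.drop_eq_nil_of_le (Nat.le_of_not_lt h)]
    simp [pvPlace, List.take_of_length_le (by omega : cur.length ≤ m)]
termination_by m => a.length - m

-- B's min-extraction recursion, as a function.
def pvMinPlace : List Int → List Int → List Int
  | [], _ => []
  | x :: xs, vals => if x = -1 then -1 :: pvMinPlace xs vals
      else match PySem.List.min? vals (fun y => y) with
        | some m => m :: pvMinPlace xs ((PySem.List.remove? vals m).getD vals)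
        | none => 0 :: pvMinPlace xs vals

-- B's foldl with an output accumulator is pvMinPlace.
theorem pv_B_loop (xs : List Int) : ∀ (vals out : List Int),
    (xs.foldl
      (fun (st : List Int × List Int) x =>
        if x = -1 then (st.1, st.2 ++ [-1])
        else match PySem.List.min? st.1 (fun y => y) with
          | some m => ((PySem.List.remove? st.1 m).getD st.1, st.2 ++ [m])
          | none => (st.1, st.2 ++ [0]))
      (vals, out)).2 = out ++ pvMinPlace xs vals := by
  induction xs with
  | nil => simp [pvMinPlace]
  | cons x xs ih =>
    intro vals out
    by_cases hx : x = -1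
    · simp [hx, pvMinPlace, ih]
    · cases hmin : PySem.List.min? vals (fun y : Int => y) with
      | some m => simp [hx, pvMinPlace, hmin, ih]
      | none => simp [hx, pvMinPlace, hmin, ih]

-- Extracting the minimum is taking the head of the sorted list: for nonempty vals with
-- first minimum m, sorted vals = m :: sorted (vals.erase m).
theorem pv_sorted_cons_min (vals : List Int) (m : Int)
    (hmin : PySem.List.min? vals (fun y => y) = some m) :
    PySem.List.sorted vals (fun x => x) false
      = m :: PySem.List.sorted (vals.erase m) (fun x => x) false := by
  have hmem : m ∈ vals := PySem.List.min?_mem hmin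
  have hle : ∀ y ∈ vals, m ≤ y := PySem.List.min?_isMin hmin
  have hperm : List.Perm (m :: PySem.List.sorted (vals.erase m) (fun x => x) false) vals :=
    List.Perm.trans (List.Perm.cons m (PySem.List.sorted_perm _ _ _))
      (List.perm_cons_erase hmem).symm
  refine PySem.List.sorted_id_eq_of_perm_of_pairwise _ _ hperm ?_
  refine List.pairwise_cons.mpr ⟨?_, PySem.List.sorted_pairwise _ _⟩
  intro y hy
  exact hle y (List.erase_subset ((PySem.List.mem_sorted _ _ _ _).mp hy))

-- min-extraction placement = placement of the sorted pool (for EVERY pool).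
theorem pv_minplace_eq_place (xs : List Int) : ∀ (vals : List Int),
    pvMinPlace xs vals = pvPlace xs (PySem.List.sorted vals (fun x => x) false) := by
  induction xs with
  | nil => intro vals; rfl
  | cons x xs ih =>
    intro vals
    by_cases hx : x = -1
    · simp [pvMinPlace, pvPlace, hx, ih]
    · cases hmin : PySem.List.min? vals (fun y : Int => y) with
      | some m =>
        have hmem : m ∈ vals := PySem.List.min?_mem hmin
        have hrm : PySem.List.remove? vals m = some (vals.erase m) :=
          PySem.List.remove?_eq_some_erase vals m hmem
        rw [pv_sorted_cons_min vals m hmin]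
        simp [pvMinPlace, pvPlace, hx, hmin, hrm, ih]
      | none =>
        have hnil : vals = [] := (PySem.List.min?_eq_none_iff vals _).mp hmin
        subst hnil
        have hs : PySem.List.sorted ([] : List Int) (fun x => x) false = [] := rfl
        simp [pvMinPlace, pvPlace, hx, hmin, ih, hs]

-- ===== VERDICT (by name: the statement is the Claim_ definition above) =====
theorem solution_spec : Claim_equal_solution := by
  intro a _
  unfold Spec_solution solution solution_alt
  have hA := pv_A_loop a
    (PySem.List.sorted (a.filter (fun i => i ≠ -1)) (fun x => x) false)
    0 a 0 rfl (fun _ _ => rfl)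
  have hB := pv_B_loop a (a.filter (fun x => x ≠ -1)) []
  simp only [Nat.cast_zero, List.drop_zero, List.take_zero, List.nil_append] at hA hB
  dsimp only
  rw [hA, hB, pv_minplace_eq_place]
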